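-- pv_equiv track=rewrite | github.com/AdemHodzic/python-learning | Day #31/uniLetters.py | solution
-- ===== SOURCE A (Python) =====
-- def solution(string):
--     arr = []
--     arr.append(string)
--     arr.extend(list(string))
--     counter = 2
--
--     result = 0
--
--     while counter < len(string):
--
--         for i in range(0, len(string) - counter + 1):
--             temp = string[i:i + counter]
--             arr.append(temp)
--
--         counter += 1
--
--     for combo in arr:
--         if unique(combo):
--             result += len(combo)
--
--     return result
--
-- def unique(string):
--     for char in string:
--         if string.count(char) > 1:
--             return False
--     return True
-- ===== SOURCE B (Python) =====
-- def solution(string):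
--     total = 0
--     n = len(string)
--     for i in range(n):
--         seen = set()
--         m = 0
--         for ch in string[i:]:
--             if ch in seen:
--                 break
--             seen.add(ch)
--             m += 1
--         total += m * (m + 1) // 2
--     return total
-- ===== Notes on version B (the rewrite author's own statement) =====
-- stated objective: faster
-- what changed: Instead of materialising every substring and testing each with a quadratic count()-based uniqueness check, B scans once from each start index with a seen-set and adds the triangular number m*(m+1)//2 for the longest distinct-char run starting there.
-- intended difference: On one-character strings A appends the whole string twice (once whole, once as its only character) and returns 2; B returns 1, the intended total length of the single distinct-char substring counted once. — e.g. on solution("a"): A returns 2, B returns 1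
import Mathlib
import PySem

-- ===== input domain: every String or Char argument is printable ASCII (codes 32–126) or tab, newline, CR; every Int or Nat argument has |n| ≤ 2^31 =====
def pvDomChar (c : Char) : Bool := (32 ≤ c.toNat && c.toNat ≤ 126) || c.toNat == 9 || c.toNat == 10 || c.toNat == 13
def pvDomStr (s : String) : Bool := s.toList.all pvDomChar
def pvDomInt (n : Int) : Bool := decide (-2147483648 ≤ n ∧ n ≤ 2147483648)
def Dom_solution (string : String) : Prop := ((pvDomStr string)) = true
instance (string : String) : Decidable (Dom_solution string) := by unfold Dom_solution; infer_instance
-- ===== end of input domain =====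

-- B replaces A's enumerate-all-substrings-and-test-each approach by one seen-set scan
-- per start index, adding the triangular number of the longest distinct-char run (faster);
-- on one-character strings A double-counts (returns 2) and B returns the intended 1 (see D_solution).


-- ===== PORT A =====
-- helper 'unique': 'for char in string: if string.count(char) > 1: return False / return True'
def pvUniqueGo (t : String) : List Char → Bool
  | [] => true
  | c :: cs => if 1 < PySem.Str.count t (String.singleton c) then false else pvUniqueGo t cs

def pvUnique (t : String) : Bool := pvUniqueGo t t.toList

def solution (string : String) : Int :=
  -- arr = [string]; arr.extend(list(string))
  let arr0 : List String := [string] ++ string.toList.map (fun c => String.singleton c)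
  -- while counter < len(string): for i in range(0, len(string)-counter+1): arr.append(string[i:i+counter])
  let arr : List String :=
    (PySem.List.pyRange 2 (PySem.Str.len string) 1).foldl
      (fun arr counter =>
        (PySem.List.pyRange 0 (PySem.Str.len string - counter + 1) 1).foldl
          (fun arr i => arr ++ [PySem.Str.slice string (some i) (some (i + counter))]) arr)
      arr0
  -- for combo in arr: if unique(combo): result += len(combo)
  arr.foldl (fun result combo => if pvUnique combo then result + PySem.Str.len combo else result) 0

-- ===== PORT B =====
-- inner 'for ch in string[i:]: if ch in seen: break; seen.add(ch); m += 1' as structural recursion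
def pvRunLen : List Char → PySem.Set Char → Int
  | [], _ => 0
  | c :: cs, seen =>
      if PySem.Set.contains seen c then 0 else 1 + pvRunLen cs (PySem.Set.add seen c)

def solution_alt (string : String) : Int :=
  (PySem.List.pyRange 0 (PySem.Str.len string) 1).foldl
    (fun total i =>
      let m := pvRunLen (PySem.Str.slice string (some i) none).toList PySem.Set.empty
      total + PySem.Int.floordiv (m * (m + 1)) 2) 0

-- ===== PRECONDITION & SPEC =====
-- On one-character strings A puts the whole string into arr twice (once whole, once as its
-- only character) and returns 2; B returns 1, the intended total length of the single
-- distinct-char substring counted once.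
def D_solution (string : String) : Prop := string.toList.length = 1
instance (string : String) : Decidable (D_solution string) := by unfold D_solution; infer_instance

def Spec_solution (string : String) (out : Int) : Prop := ¬ D_solution string → out = solution_alt string
instance (string : String) (out : Int) : Decidable (Spec_solution string out) := by unfold Spec_solution; infer_instance

def pvDiffWitness_solution : String := "a"
def pvDiffWitnessOut_solution : Int × Int := (2, 1)

-- ===== CLAIM (what is proved, stated in full; the proofs are below) =====
def Claim_unchanged_solution : Prop := ∀ (string : String), Dom_solution string → Spec_solution string (solution string)
def Claim_changed_solution : Prop := Dom_solution (pvDiffWitness_solution) ∧ D_solution (pvDiffWitness_solution) ∧ solution (pvDiffWitness_solution) = pvDiffWitnessOut_solution.1 ∧ solution_alt (pvDiffWitness_solution) = pvDiffWitnessOut_solution.2 ∧ pvDiffWitnessOut_solution.1 ≠ pvDiffWitnessOut_solution.2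
def Claim_exact_solution : Prop := ∀ (string : String), Dom_solution string → D_solution string → solution string ≠ solution_alt string

-- ===== LEMMAS AND PROOFS =====

-- value of one combo: its length if its characters are distinct, else 0 (list side)
def pvG (t : List Char) : Int := if t.Nodup then (t.length : Int) else 0

-- str.count with a single-character needle is the character count
lemma pvCountGo (c : Char) : ∀ (l : List Char) (fuel : Nat) (acc : Nat), l.length ≤ fuel →
    PySem.Chars.count.go [c] fuel l acc = acc + l.count c := by
  intro l
  induction l with
  | nil => intro fuel acc _; cases fuel <;> simp [PySem.Chars.count.go]
  | cons h t ih =>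
      intro fuel acc hf
      cases fuel with
      | zero => simp at hf
      | succ f =>
          have hf' : t.length ≤ f := by simpa using hf
          rw [PySem.Chars.count.go]
          by_cases hc : c = h
          · subst hc
            simp [List.isPrefixOf, ih f (acc + 1) hf']
            omega
          · have : ([c].isPrefixOf (h :: t)) = false := by
              simp [List.isPrefixOf]
              exact fun h' => hc (by simpa using h')
            rw [this]
            simp [ih f acc hf', List.count_cons]
            intro h'; exact absurd h'.symm hc

lemma pvCount_singleton (s : List Char) (c : Char) : PySem.Chars.count s [c] = s.count c := by
  simp [PySem.Chars.count, pvCountGo c s s.length 0 le_rfl]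

lemma pvUniqueGo_iff (t : String) (l : List Char) :
    pvUniqueGo t l = true ↔ ∀ c ∈ l, t.toList.count c ≤ 1 := by
  induction l with
  | nil => simp [pvUniqueGo]
  | cons c cs ih =>
      rw [pvUniqueGo]
      by_cases h : 1 < PySem.Str.count t (String.singleton c)
      · rw [if_pos h]
        simp only [PySem.Str.count_eq, String.toList_singleton, pvCount_singleton] at h
        simp only [Bool.false_eq_true, false_iff]
        push Not
        exact ⟨c, List.mem_cons_self, by omega⟩
      · rw [if_neg h, ih]
        simp only [PySem.Str.count_eq, String.toList_singleton, pvCount_singleton] at h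
        constructor
        · intro h' x hx
          rcases List.mem_cons.1 hx with rfl | hx'
          · omega
          · exact h' x hx'
        · intro h' x hx; exact h' x (List.mem_cons_of_mem _ hx)

lemma pvUnique_iff (t : String) : pvUnique t = true ↔ t.toList.Nodup := by
  rw [pvUnique, pvUniqueGo_iff, List.nodup_iff_count_le_one]
  constructor
  · intro h a
    by_cases ha : a ∈ t.toList
    · exact h a ha
    · simp [List.count_eq_zero_of_not_mem ha]
  · intro h c _; exact h c

lemma pvGS_eq (t : String) :
    (if pvUnique t then PySem.Str.len t else 0) = if t.toList.Nodup then (t.toList.length : Int) else 0 := by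
  by_cases h : pvUnique t
  · rw [if_pos h, if_pos ((pvUnique_iff t).1 h), PySem.Str.len_eq]
  · rw [if_neg h, if_neg (fun hn => h ((pvUnique_iff t).2 hn))]

lemma pvRunLen_nonneg (l : List Char) : ∀ (seen : PySem.Set Char), 0 ≤ pvRunLen l seen := by
  induction l with
  | nil => intro seen; simp [pvRunLen]
  | cons c cs ih =>
      intro seen
      rw [pvRunLen]
      split
      · exact le_rfl
      · have := ih (PySem.Set.add seen c); omega

lemma pvRunLen_le (l : List Char) : ∀ (seen : PySem.Set Char), pvRunLen l seen ≤ (l.length : Int) := by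
  induction l with
  | nil => intro seen; simp [pvRunLen]
  | cons c cs ih =>
      intro seen
      rw [pvRunLen]
      split
      · simp; omega
      · have := ih (PySem.Set.add seen c); simp; omega

lemma pvTake_nodup_iff (l : List Char) : ∀ (seen : PySem.Set Char) (k : Nat), k ≤ l.length →
    (((l.take k).Nodup ∧ ∀ c ∈ l.take k, ¬ (PySem.Set.contains seen c = true)) ↔
      (k : Int) ≤ pvRunLen l seen) := by
  induction l with
  | nil =>
      intro seen k hk
      simp only [List.length_nil, Nat.le_zero] at hk
      have : k = 0 := hk
      subst this
      simp [pvRunLen]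
  | cons c cs ih =>
      intro seen k hk
      cases k with
      | zero => simpa using pvRunLen_nonneg (c :: cs) seen
      | succ k' =>
          have hk' : k' ≤ cs.length := by simpa using hk
          rw [pvRunLen]
          by_cases hc : PySem.Set.contains seen c = true
          · rw [if_pos hc]
            constructor
            · rintro ⟨_, hall⟩
              exact absurd hc (hall c (by simp))
            · intro h; omega
          · rw [if_neg hc]
            have ihk := ih (PySem.Set.add seen c) k' hk'
            constructor
            · rintro ⟨hnd, hall⟩
              have h1 : (cs.take k').Nodup := by
                simpa using hnd.of_cons
              have hcnot : c ∉ cs.take k' := by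
                simp only [List.take_succ_cons] at hnd
                exact (List.nodup_cons.1 hnd).1
              have h2 : ∀ x ∈ cs.take k', ¬ (PySem.Set.contains (PySem.Set.add seen c) x = true) := by
                intro x hx
                have hxs : ¬ (PySem.Set.contains seen x = true) :=
                  hall x (by simp [List.take_succ_cons, hx])
                have hxc : x ≠ c := fun h => hcnot (h ▸ hx)
                simp only [PySem.Set.contains, List.contains_iff_mem] at hxs ⊢
                rw [PySem.Set.mem_add]
                tauto
              have := ihk.1 ⟨h1, h2⟩
              omega
            · intro h
              have hk2 : (k' : Int) ≤ pvRunLen cs (PySem.Set.add seen c) := by omega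
              obtain ⟨h1, h2⟩ := ihk.2 hk2
              refine ⟨?_, ?_⟩
              · rw [List.take_succ_cons, List.nodup_cons]
                refine ⟨?_, h1⟩
                intro hmem
                have := h2 c hmem
                simp only [PySem.Set.contains, List.contains_iff_mem, PySem.Set.mem_add] at this
                tauto
              · intro x hx
                rcases List.mem_cons.1 (by simpa [List.take_succ_cons] using hx) with rfl | hx'
                · exact hc
                · intro hxs
                  apply h2 x hx'
                  simp only [PySem.Set.contains, List.contains_iff_mem, PySem.Set.mem_add] at hxs ⊢
                  tauto

lemma pvGauss (M : Nat) :
    PySem.Int.floordiv ((M : Int) * ((M : Int) + 1)) 2 = ∑ j ∈ Finset.range M, ((j : Int) + 1) := by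
  have h2 : (2 : Int) * (∑ j ∈ Finset.range M, ((j : Int) + 1)) = (M : Int) * ((M : Int) + 1) := by
    induction M with
    | zero => simp
    | succ m ih => rw [Finset.sum_range_succ]; push_cast; push_cast at ih; ring_nf; ring_nf at ih; omega
  rw [← h2, PySem.Int.floordiv, Int.mul_fdiv_cancel_left _ (by norm_num)]

lemma pvRow (l : List Char) :
    PySem.Int.floordiv (pvRunLen l ∅ * (pvRunLen l ∅ + 1)) 2
      = ∑ j ∈ Finset.range l.length, pvG (l.take (j + 1)) := by
  have hnn := pvRunLen_nonneg l ∅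
  have hle := pvRunLen_le l ∅
  set m := pvRunLen l ∅ with hm
  have hMdef : m = ((m.toNat : Nat) : Int) := by omega
  set M := m.toNat with hMn
  have hMle : M ≤ l.length := by omega
  have hterm : ∀ j ∈ Finset.range l.length, pvG (l.take (j + 1)) = if j < M then ((j : Int) + 1) else 0 := by
    intro j hj
    rw [Finset.mem_range] at hj
    have hj1 : j + 1 ≤ l.length := hj
    have hiff := pvTake_nodup_iff l ∅ (j + 1) hj1
    have hlen : (l.take (j + 1)).length = j + 1 := by simp [List.length_take]; omega
    have hiff' : (l.take (j + 1)).Nodup ↔ (j + 1 ≤ M) := by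
      constructor
      · intro hnd
        have := hiff.1 ⟨hnd, fun c _ => by simp [PySem.Set.contains]⟩
        omega
      · intro hM
        exact (hiff.2 (by push_cast; omega)).1
    by_cases hnd : (l.take (j + 1)).Nodup
    · rw [pvG, if_pos hnd, hlen, if_pos (by have := hiff'.1 hnd; omega)]
      push_cast; ring
    · rw [pvG, if_neg hnd, if_neg (fun h => hnd (hiff'.2 (by omega)))]
  have h1 : ∑ x ∈ Finset.range l.length, (if x < M then ((x : Int) + 1) else 0)
      = ∑ x ∈ Finset.range M, (if x < M then ((x : Int) + 1) else 0) :=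
    (Finset.sum_subset (by intro x hx; rw [Finset.mem_range] at hx ⊢; omega)
      (fun x _ hx => by rw [Finset.mem_range] at hx; rw [if_neg (by omega)])).symm
  have h2 : ∑ x ∈ Finset.range M, (if x < M then ((x : Int) + 1) else 0)
      = ∑ x ∈ Finset.range M, ((x : Int) + 1) :=
    Finset.sum_congr rfl (fun x hx => by rw [Finset.mem_range] at hx; rw [if_pos hx])
  rw [Finset.sum_congr rfl hterm, h1, h2, hMdef, pvGauss]

lemma pvTriSwap (n : Nat) (H : Nat → Nat → Int) :
    ∑ j ∈ Finset.range n, ∑ i ∈ Finset.range (n - j), H j i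
      = ∑ i ∈ Finset.range n, ∑ j ∈ Finset.range (n - i), H j i := by
  have key : ∀ (G : Nat → Nat → Int), (∀ j, ∀ i, n ≤ i + j → G j i = 0) →
      ∑ j ∈ Finset.range n, ∑ i ∈ Finset.range (n - j), G j i
        = ∑ j ∈ Finset.range n, ∑ i ∈ Finset.range n, G j i := by
    intro G hG
    refine Finset.sum_congr rfl (fun j hj => ?_)
    rw [Finset.mem_range] at hj
    refine Finset.sum_subset (by intro x hx; rw [Finset.mem_range] at hx ⊢; omega) ?_
    intro x _ hx
    rw [Finset.mem_range] at hx
    exact hG j x (by omega)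
  set G : Nat → Nat → Int := fun j i => if i + j < n then H j i else 0 with hGdef
  have h1 : ∀ j ∈ Finset.range n, ∑ i ∈ Finset.range (n - j), H j i = ∑ i ∈ Finset.range (n - j), G j i := by
    intro j hj
    rw [Finset.mem_range] at hj
    exact Finset.sum_congr rfl (fun i hi => by
      rw [Finset.mem_range] at hi
      show H j i = if i + j < n then H j i else 0
      rw [if_pos (by omega)])
  have h2 : ∀ i ∈ Finset.range n, ∑ j ∈ Finset.range (n - i), H j i = ∑ j ∈ Finset.range (n - i), G j i := by
    intro i hi
    rw [Finset.mem_range] at hi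
    exact Finset.sum_congr rfl (fun j hj => by
      rw [Finset.mem_range] at hj
      show H j i = if i + j < n then H j i else 0
      rw [if_pos (by omega)])
  rw [Finset.sum_congr rfl h1, Finset.sum_congr rfl h2]
  rw [key G (fun j i h => by show (if i + j < n then H j i else 0) = 0; rw [if_neg (by omega)])]
  rw [Finset.sum_comm]
  refine (Finset.sum_congr rfl (fun i hi => ?_)).symm
  rw [Finset.mem_range] at hi
  refine Finset.sum_subset (by intro x hx; rw [Finset.mem_range] at hx ⊢; omega) ?_
  intro x _ hx
  rw [Finset.mem_range] at hx
  show (if i + x < n then H x i else 0) = 0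
  exact if_neg (by omega)

lemma pvB_eq (string : String) :
    solution_alt string
      = ∑ i ∈ Finset.range string.toList.length,
          ∑ j ∈ Finset.range (string.toList.length - i),
            pvG ((string.toList.drop i).take (j + 1)) := by
  rw [solution_alt]
  rw [PySem.Str.len_eq, PySem.List.pyRange_one]
  have htn : ((string.toList.length : Int) - 0).toNat = string.toList.length := by omega
  rw [htn]
  rw [List.foldl_map]
  rw [PySem.List.foldl_add (List.range string.toList.length)
    (fun k => PySem.Int.floordiv
      ((pvRunLen (PySem.Str.slice string (some (0 + (k : Int))) none).toList PySem.Set.empty) *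
       ((pvRunLen (PySem.Str.slice string (some (0 + (k : Int))) none).toList PySem.Set.empty) + 1)) 2) 0]
  rw [zero_add]
  have : ∀ k ∈ List.range string.toList.length,
      PySem.Int.floordiv
        ((pvRunLen (PySem.Str.slice string (some (0 + (k : Int))) none).toList PySem.Set.empty) *
         ((pvRunLen (PySem.Str.slice string (some (0 + (k : Int))) none).toList PySem.Set.empty) + 1)) 2
      = ∑ j ∈ Finset.range (string.toList.length - k),
          pvG ((string.toList.drop k).take (j + 1)) := by
    intro k hk
    rw [List.mem_range] at hk
    have hsl : (PySem.Str.slice string (some (0 + (k : Int))) none).toList = string.toList.drop k := by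
      rw [PySem.Str.toList_slice, zero_add, PySem.Chars.slice_eq_listSlice,
        PySem.List.slice_from_natCast]
    rw [hsl]
    have := pvRow (string.toList.drop k)
    simp only [List.length_drop] at this
    exact this
  rw [List.map_congr_left this]
  rfl

lemma pvSumFlatMap {α : Type} (f : α → List Int) (l : List α) :
    (l.flatMap f).sum = (l.map (fun a => (f a).sum)).sum := by
  induction l with
  | nil => simp
  | cons a l ih => simp [List.flatMap_cons, ih]

-- list-range sum is a Finset.range sum
lemma pvSumRange (m : Nat) (f : Nat → Int) : ((List.range m).map f).sum = ∑ i ∈ Finset.range m, f i := by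
  rfl

lemma pvA_eq (string : String) (hn2 : 2 ≤ string.toList.length) :
    solution string
      = ∑ j ∈ Finset.range string.toList.length,
          ∑ i ∈ Finset.range (string.toList.length - j),
            pvG ((string.toList.drop i).take (j + 1)) := by
  set cs := string.toList with hcs
  set n := cs.length with hn
  rw [solution]
  -- inner append loop = append of a map
  rw [PySem.List.foldl_congr_mem _ _
    (fun arr counter => arr ++ (PySem.List.pyRange 0 (PySem.Str.len string - counter + 1) 1).map
      (fun i => PySem.Str.slice string (some i) (some (i + counter)))) _
    (fun acc x _ => PySem.List.foldl_append_singleton_eq_map _ _ _)]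
  rw [PySem.List.foldl_append_eq_flatMap]
  -- result loop = sum of per-combo values
  rw [PySem.List.foldl_congr_mem _ _
    (fun result combo => result + (if pvUnique combo then PySem.Str.len combo else 0)) _
    (fun acc x _ => by by_cases h : pvUnique x <;> simp [h])]
  rw [PySem.List.foldl_add _ (fun combo => if pvUnique combo then PySem.Str.len combo else 0) 0, zero_add]
  simp only [pvGS_eq]
  rw [List.map_append, List.sum_append]
  -- head + singles
  have hhead : ((([string] ++ cs.map (fun c => String.singleton c)).map
      (fun t => if t.toList.Nodup then (t.toList.length : Int) else 0)).sum)
      = pvG cs + (n : Int) := by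
    rw [List.map_append, List.sum_append]
    simp only [List.map_cons, List.map_nil, List.sum_cons, List.sum_nil, List.map_map]
    have h1 : (cs.map ((fun t => if t.toList.Nodup then (t.toList.length : Int) else 0) ∘
        (fun c => String.singleton c))) = cs.map (fun _ => (1 : Int)) := by
      refine List.map_congr_left (fun c _ => ?_)
      simp [String.toList_singleton]
    rw [h1, PySem.List.sum_map_const_int]
    rw [pvG, ← hcs, ← hn]
    ring
  have hM : n - 2 + 2 = n := by omega
  have hflat : (((PySem.List.pyRange 2 (PySem.Str.len string) 1).flatMap
        (fun counter => (PySem.List.pyRange 0 (PySem.Str.len string - counter + 1) 1).map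
          (fun i => PySem.Str.slice string (some i) (some (i + counter))))).map
        (fun t => if t.toList.Nodup then (t.toList.length : Int) else 0)).sum
      = ∑ t ∈ Finset.range (n - 2),
          ∑ i ∈ Finset.range (n - (t + 1)), pvG ((cs.drop i).take (t + 1 + 1)) := by
    rw [List.map_flatMap, pvSumFlatMap]
    rw [PySem.Str.len_eq, ← hcs, ← hn, PySem.List.pyRange_one]
    have ht2 : ((n : Int) - 2).toNat = n - 2 := by omega
    rw [ht2, List.map_map, pvSumRange]
    refine Finset.sum_congr rfl (fun t ht => ?_)
    rw [Finset.mem_range] at ht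
    show (((PySem.List.pyRange 0 ((n : Int) - (2 + (t : Int)) + 1) 1).map
        (fun i => PySem.Str.slice string (some i) (some (i + (2 + (t : Int)))))).map
        (fun u => if u.toList.Nodup then (u.toList.length : Int) else 0)).sum = _
    rw [PySem.List.pyRange_one, List.map_map, List.map_map]
    have htn : ((n : Int) - (2 + (t : Int)) + 1 - 0).toNat = n - (t + 1) := by omega
    rw [htn, pvSumRange]
    refine Finset.sum_congr rfl (fun k hk => ?_)
    rw [Finset.mem_range] at hk
    show (if (PySem.Str.slice string (some (0 + (k : Int)))
        (some (0 + (k : Int) + (2 + (t : Int))))).toList.Nodup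
      then ((PySem.Str.slice string (some (0 + (k : Int)))
        (some (0 + (k : Int) + (2 + (t : Int))))).toList.length : Int) else 0) = _
    have hcast : (0 : Int) + (k : Int) + ((2 : Int) + (t : Int)) = (k : Int) + ((t + 2 : Nat) : Int) := by
      push_cast; ring
    rw [zero_add] at hcast ⊢
    rw [hcast]
    rw [PySem.Str.toList_slice, PySem.Chars.slice_eq_listSlice, ← hcs,
      PySem.List.slice_natCast_add]
    show pvG ((cs.drop k).take (t + 2)) = pvG ((cs.drop k).take (t + 1 + 1))
    rfl
  rw [hhead, hflat]
  obtain ⟨M, hnM⟩ : ∃ M, n = M + 2 := ⟨n - 2, by omega⟩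
  have hM2 : n - 2 = M := by omega
  rw [hM2, hnM, Finset.sum_range_succ, Finset.sum_range_succ']
  have hf0 : (∑ i ∈ Finset.range (M + 2 - 0), pvG ((cs.drop i).take (0 + 1))) = ((M + 2 : Nat) : Int) := by
    have : ∀ i ∈ Finset.range (M + 2 - 0), pvG ((cs.drop i).take (0 + 1)) = 1 := by
      intro i hi
      rw [Finset.mem_range] at hi
      have hi' : i < cs.length := by omega
      rw [List.drop_eq_getElem_cons hi']
      rw [show (0 + 1) = 1 from rfl, show ∀ (a : Char) (l : List Char), List.take 1 (a :: l) = [a] from fun a l => rfl]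
      simp [pvG]
    rw [Finset.sum_congr rfl this]
    simp
  have hfM : (∑ i ∈ Finset.range (M + 2 - (M + 1)), pvG ((cs.drop i).take (M + 1 + 1))) = pvG cs := by
    have h1 : M + 2 - (M + 1) = 1 := by omega
    rw [h1, Finset.sum_range_one, List.drop_zero]
    have h2 : cs.take (M + 1 + 1) = cs := by
      have : cs.length ≤ M + 1 + 1 := by omega
      exact List.take_of_length_le this
    rw [h2]
  rw [hf0, hfM]
  have hrange : ∀ t ∈ Finset.range M, (∑ i ∈ Finset.range (M + 2 - (t + 1)), pvG ((cs.drop i).take (t + 1 + 1)))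
      = ∑ i ∈ Finset.range (n - (t + 1)), pvG ((cs.drop i).take (t + 1 + 1)) := by
    intro t ht
    have : M + 2 - (t + 1) = n - (t + 1) := by omega
    rw [this]
  rw [Finset.sum_congr rfl hrange]
  push_cast [hnM]
  ring

-- ===== VERDICT (by name: the statement is the Claim_ definition above) =====
theorem solution_spec : Claim_unchanged_solution := by
  intro string _ hD
  unfold D_solution at hD
  by_cases h0 : string.toList.length = 0
  · show solution string = solution_alt string
    have hl : string.toList = [] := List.length_eq_zero_iff.1 h0
    have hlen : PySem.Str.len string = 0 := by rw [PySem.Str.len_eq, h0]; rfl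
    rw [pvB_eq, h0, solution, hlen, hl]
    simp only [List.map_nil, List.append_nil,
      PySem.List.pyRange_one_eq_nil (by norm_num : (0:Int) ≤ 2), List.foldl_nil,
      List.foldl_cons, Finset.range_zero, Finset.sum_empty]
    by_cases h : pvUnique string
    · rw [if_pos h, zero_add, hlen]
    · rw [if_neg h]
  · have hn2 : 2 ≤ string.toList.length := by omega
    rw [pvA_eq string hn2, pvB_eq string, pvTriSwap]

theorem solution_changed : Claim_changed_solution := by
  unfold Claim_changed_solution; decide

theorem solution_tight : Claim_exact_solution := by
  intro string _ hD
  unfold D_solution at hD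
  obtain ⟨c, hl⟩ : ∃ c, string.toList = [c] := by
    cases hcs : string.toList with
    | nil => rw [hcs] at hD; simp at hD
    | cons a t =>
        rw [hcs] at hD; simp at hD
        exact ⟨a, by rw [hD]⟩
  have hlen : PySem.Str.len string = 1 := by rw [PySem.Str.len_eq, hD]; rfl
  have huniq : pvUnique string = true := by
    rw [pvUnique, hl, pvUniqueGo, pvUniqueGo]
    rw [if_neg]
    simp [PySem.Str.count_eq, String.toList_singleton, pvCount_singleton, hl]
  have huc : pvUnique (String.singleton c) = true := by
    rw [pvUnique, String.toList_singleton, pvUniqueGo, pvUniqueGo]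
    rw [if_neg]
    simp [PySem.Str.count_eq, String.toList_singleton, pvCount_singleton]
  have hB : solution_alt string = 1 := by
    rw [pvB_eq, hD, hl]
    simp [pvG]
  have hlen2 : PySem.Str.len (String.singleton c) = 1 := by
    rw [PySem.Str.len_eq, String.toList_singleton]; rfl
  have hA : solution string = 2 := by
    rw [solution, hlen, hl]
    simp only [List.map_cons, List.map_nil, List.singleton_append,
      PySem.List.pyRange_one_eq_nil (by norm_num : (1:Int) ≤ 2), List.foldl_nil,
      List.foldl_cons, huniq, huc, if_pos, hlen, hlen2]
    norm_num
  rw [hA, hB]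
  norm_num
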